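-- pv_equiv track=rewrite | github.com/tylerjsmith111/GeneralizIT | generalizit/design.py | _get_tau_facets
-- ===== SOURCE A (Python) =====
-- from itertools import product, combinations
--
-- def _get_tau_facets(
--
--         facet_of_differentiation: str,
--         facet_of_differentiation_tup: tuple,
--         variance_tup_dict: dict,
-- ) -> list:
--     """
--     Determine the appropriate facets to include in the tau calculation for generalizability coefficients.
--
--     This function identifies the primary facet of differentiation and any lower-order interaction facets
--     that are subsets of the current facet tuple (`facet_of_differentiation_tup`) and exist in the
--     `variance_tup_dict`. The resulting list is used in calculations for generalizability coefficients.
--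
--     Parameters:
--         facet_of_differentiation (str): The primary facet for which tau is being calculated.
--         facet_of_differentiation_tup (tuple): Tuple representing the facet's structure (e.g., nested or crossed facets).
--         variance_tup_dict (dict): Dictionary where keys are facet names and values are tuples representing
--                                   the structure of their variance components.
--
--     Returns:
--         list: A list of facets to include in the tau calculation. Includes the primary facet and any valid
--               lower-order interaction facets.
--
--     Example:
--         >>> variance_tup_dict = {'p': ('p',), 'pi': ('p', 'i'), 'mean': ()}
--         >>> self._get_tau_facets(df, 'pi', ('p', 'i'), variance_tup_dict)
--         ['pi', 'p']
--     """
--     # Initialize the tau facets with the primary facet of differentiation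
--     tau_facets = [facet_of_differentiation]
--
--     # Check for interactions if the facet tuple has more than one element
--     if len(facet_of_differentiation_tup) > 1:
--         # Generate all potential lower-order subsets of the facet tuple
--         for i in range(len(facet_of_differentiation_tup) - 1, 0, -1):
--             # Generate all combinations of the tuple elements of length i
--             combos = {frozenset(combo) for combo in combinations(facet_of_differentiation_tup, i)}
--
--             # Check if these combinations exist in the variance dictionary
--             for key, variance_tup in variance_tup_dict.items():
--                 if len(variance_tup) == i and frozenset(variance_tup) in combos:
--                     tau_facets.append(key)
--
--     return tau_facets
-- ===== SOURCE B (Python) =====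
-- def _get_tau_facets(
--         facet_of_differentiation: str,
--         facet_of_differentiation_tup: tuple,
--         variance_tup_dict: dict,
-- ) -> list:
--     # One pass over the dict: test each variance tuple directly as a strict
--     # lower-order sub-selection of the differentiation tuple, grouping the
--     # matching keys by tuple length; then emit groups by descending length.
--     L = len(facet_of_differentiation_tup)
--     members = set(facet_of_differentiation_tup)
--     buckets = {}
--     for key, variance_tup in variance_tup_dict.items():
--         i = len(variance_tup)
--         needed = set(variance_tup)
--         if 1 <= i < L and needed <= members and \
--                 i <= sum(1 for x in facet_of_differentiation_tup if x in needed):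
--             buckets[i] = buckets.get(i, []) + [key]
--     tau_facets = [facet_of_differentiation]
--     for i in range(L - 1, 0, -1):
--         tau_facets += buckets.get(i, [])
--     return tau_facets
-- ===== Notes on version B (the rewrite author's own statement) =====
-- stated objective: faster
-- what changed: Instead of materializing, for each length i, all C(L,i) frozenset combinations of the differentiation tuple and rescanning the whole dict once per length, B makes a single pass over the dict testing each variance tuple directly as a strict lower-order sub-selection (subset + multiplicity count), grouping matching keys by length, and then emits the groups by descending length.
import Mathlib
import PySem

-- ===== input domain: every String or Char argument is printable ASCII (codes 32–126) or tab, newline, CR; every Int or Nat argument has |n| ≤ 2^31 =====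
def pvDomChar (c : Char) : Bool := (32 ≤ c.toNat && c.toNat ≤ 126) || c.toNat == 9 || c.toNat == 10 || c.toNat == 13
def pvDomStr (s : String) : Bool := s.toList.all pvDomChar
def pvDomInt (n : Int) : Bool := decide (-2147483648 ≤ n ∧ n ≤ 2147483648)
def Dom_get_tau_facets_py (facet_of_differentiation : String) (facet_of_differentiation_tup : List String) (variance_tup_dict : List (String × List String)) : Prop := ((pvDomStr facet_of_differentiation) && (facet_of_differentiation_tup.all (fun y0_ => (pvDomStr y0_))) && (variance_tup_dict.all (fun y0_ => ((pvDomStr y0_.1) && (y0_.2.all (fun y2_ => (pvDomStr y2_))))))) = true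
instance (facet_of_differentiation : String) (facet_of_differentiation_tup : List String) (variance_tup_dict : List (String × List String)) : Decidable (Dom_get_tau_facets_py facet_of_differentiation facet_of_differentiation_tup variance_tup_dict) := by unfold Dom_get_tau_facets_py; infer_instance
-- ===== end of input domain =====

-- B replaces A's per-length enumeration of all frozenset combinations (and per-length dict rescans)
-- by a single dict pass with a direct subset/multiplicity test, grouping keys by length (faster).



-- ===== PORT A =====
-- itertools.combinations(l, i) (order-exact)
def pyCombinations : List String → Nat → List (List String)
  | _, 0 => [[]]
  | [], _+1 => []
  | x :: xs, i+1 => (pyCombinations xs i).map (x :: ·) ++ pyCombinations xs (i+1)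

-- Port of A. The Python set of frozensets 'combos' is only used for the membership test
-- 'frozenset(variance_tup) in combos', which is ported exactly as existence of a set-equal
-- element ('any' + PySem.Set.equal); deduplication cannot change that membership test.
def get_tau_facets_py (facet_of_differentiation : String) (facet_of_differentiation_tup : List String) (variance_tup_dict : List (String × List String)) : List String :=
  let tau_facets := [facet_of_differentiation]
  if facet_of_differentiation_tup.length > 1 then
    (PySem.List.pyRange ((facet_of_differentiation_tup.length : Int) - 1) 0 (-1)).foldl
      (fun acc i =>
        let combos := (pyCombinations facet_of_differentiation_tup i.toNat).map (fun c => PySem.Set.ofList c)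
        ((PySem.Dict.ofList variance_tup_dict).items).foldl
          (fun acc kv =>
            if (kv.2.length : Int) == i && combos.any (fun s => PySem.Set.equal s (PySem.Set.ofList kv.2)) then
              acc ++ [kv.1]
            else acc) acc)
      tau_facets
  else tau_facets

-- ===== PORT B =====
-- B: one pass over the dict grouping matching keys by tuple length, then the groups
-- are emitted by descending length.
def get_tau_facets_py_alt (facet_of_differentiation : String) (facet_of_differentiation_tup : List String) (variance_tup_dict : List (String × List String)) : List String :=
  let L := facet_of_differentiation_tup.length
  let members := PySem.Set.ofList facet_of_differentiation_tup
  let buckets : PySem.Dict Int (List String) :=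
    ((PySem.Dict.ofList variance_tup_dict).items).foldl
      (fun b kv =>
        let i := kv.2.length
        let needed := PySem.Set.ofList kv.2
        if 1 ≤ i ∧ i < L ∧ PySem.Set.issubset needed members = true ∧
            i ≤ facet_of_differentiation_tup.countP (fun x => decide (x ∈ needed)) then
          b.modify (i : Int) [] (· ++ [kv.1])
        else b)
      PySem.Dict.empty
  (PySem.List.pyRange ((L : Int) - 1) 0 (-1)).foldl
    (fun acc i => acc ++ buckets.getD i []) [facet_of_differentiation]

-- ===== PRECONDITION & SPEC =====
def Spec_get_tau_facets_py (facet_of_differentiation : String) (facet_of_differentiation_tup : List String) (variance_tup_dict : List (String × List String)) (out : List String) : Prop := out = get_tau_facets_py_alt facet_of_differentiation facet_of_differentiation_tup variance_tup_dict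
instance (facet_of_differentiation : String) (facet_of_differentiation_tup : List String) (variance_tup_dict : List (String × List String)) (out : List String) : Decidable (Spec_get_tau_facets_py facet_of_differentiation facet_of_differentiation_tup variance_tup_dict out) := by unfold Spec_get_tau_facets_py; infer_instance

-- ===== CLAIM (what is proved, stated in full; the proofs are below) =====
def Claim_equal_get_tau_facets_py : Prop := ∀ (facet_of_differentiation : String) (facet_of_differentiation_tup : List String) (variance_tup_dict : List (String × List String)), Dom_get_tau_facets_py facet_of_differentiation facet_of_differentiation_tup variance_tup_dict → Spec_get_tau_facets_py facet_of_differentiation facet_of_differentiation_tup variance_tup_dict (get_tau_facets_py facet_of_differentiation facet_of_differentiation_tup variance_tup_dict)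

-- ===== LEMMAS AND PROOFS =====

-- membership in the port's itertools.combinations: sublists of the given length
lemma mem_pyCombinations (l : List String) : ∀ (i : Nat) (c : List String),
    c ∈ pyCombinations l i ↔ c.Sublist l ∧ c.length = i := by
  induction l with
  | nil =>
    intro i c
    cases i with
    | zero => simp [pyCombinations, List.length_eq_zero_iff, List.sublist_nil]
    | succ j => simp only [pyCombinations, List.not_mem_nil, false_iff]; rintro ⟨h, hl⟩; simp [List.sublist_nil] at h; simp [h] at hl
  | cons x xs ih =>
    intro i c
    cases i with
    | zero =>
      simp [pyCombinations, List.length_eq_zero_iff]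
      intro h; subst h; exact List.nil_sublist _
    | succ j =>
      simp only [pyCombinations, List.mem_append, List.mem_map, ih]
      constructor
      · rintro (⟨c', ⟨hc', hlen⟩, rfl⟩ | ⟨hsub, hlen⟩)
        · exact ⟨List.Sublist.cons₂ x hc', by simp [hlen]⟩
        · exact ⟨List.Sublist.cons x hsub, hlen⟩
      · rintro ⟨hsub, hlen⟩
        cases hsub with
        | cons _ h => exact Or.inr ⟨h, hlen⟩
        | cons₂ _ h => exact Or.inl ⟨_, ⟨h, by simpa using hlen⟩, rfl⟩

-- a sublist can be padded, within the bigger list, to any length between the two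
lemma sublist_pad {α : Type} (F : List α) : ∀ (s : List α) (i : Nat),
    s.Sublist F → s.length ≤ i → i ≤ F.length →
    ∃ c, s.Sublist c ∧ c.Sublist F ∧ c.length = i := by
  induction F with
  | nil =>
    intro s i hs h1 h2
    exact ⟨s, List.Sublist.refl s, hs, by simp at h2; simp [List.sublist_nil] at hs; omega⟩
  | cons a F ih =>
    intro s i hs h1 h2
    cases hs with
    | cons _ hs' =>
      cases i with
      | zero =>
        have : s = [] := List.length_eq_zero_iff.1 (Nat.le_zero.1 h1)
        exact ⟨[], by simp [this], List.nil_sublist _, rfl⟩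
      | succ j =>
        by_cases hsl : s.length = j + 1
        · exact ⟨s, List.Sublist.refl s, List.Sublist.cons a hs', hsl⟩
        · obtain ⟨c', h1', h2', h3'⟩ := ih s j hs' (by omega) (by simpa using h2)
          exact ⟨a :: c', List.Sublist.cons a h1', List.Sublist.cons₂ a h2', by simp [h3']⟩
    | cons₂ _ hs' =>
      rename_i s'
      cases i with
      | zero => simp at h1
      | succ j =>
        obtain ⟨c', h1', h2', h3'⟩ := ih s' j hs' (by simpa using h1) (by simpa using h2)
        exact ⟨a :: c', List.Sublist.cons₂ a h1', List.Sublist.cons₂ a h2', by simp [h3']⟩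

-- A's frozenset-membership test equals B's direct subset/count test
lemma combos_iff (tup v : List String) :
    ((pyCombinations tup v.length).any
        (fun c => PySem.Set.equal (PySem.Set.ofList c) (PySem.Set.ofList v))) = true
    ↔ ((∀ x ∈ v, x ∈ tup) ∧
        v.length ≤ tup.countP (fun x => decide (x ∈ PySem.Set.ofList v))) := by
  rw [List.any_eq_true]
  constructor
  · rintro ⟨c, hc, heq⟩
    rw [mem_pyCombinations] at hc
    rw [PySem.Set.equal_iff] at heq
    have hmem : ∀ x, x ∈ c ↔ x ∈ v := by
      intro x; have := heq x; simpa [PySem.Set.mem_ofList] using this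
    refine ⟨fun x hx => hc.1.subset ((hmem x).2 hx), ?_⟩
    rw [List.countP_eq_length_filter]
    have hcf : c.filter (fun x => decide (x ∈ PySem.Set.ofList v)) = c := by
      apply List.filter_eq_self.2
      intro x hx
      simp [PySem.Set.mem_ofList, (hmem x).1 hx]
    calc v.length = c.length := hc.2.symm
    _ = (c.filter (fun x => decide (x ∈ PySem.Set.ofList v))).length := by rw [hcf]
    _ ≤ (tup.filter (fun x => decide (x ∈ PySem.Set.ofList v))).length :=
        (hc.1.filter _).length_le
  · rintro ⟨hsub, hcnt⟩
    rw [List.countP_eq_length_filter] at hcnt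
    set p : String → Bool := fun x => decide (x ∈ PySem.Set.ofList v) with hp
    set F := tup.filter p with hF
    have hFt : F.Sublist tup := List.filter_sublist
    have hsF : F.dedup.Sublist F := List.dedup_sublist F
    have hsv : F.dedup ⊆ v := by
      intro x hx
      have : x ∈ F := List.mem_dedup.1 hx
      have := List.of_mem_filter this
      simpa [hp, PySem.Set.mem_ofList] using this
    have hslen : F.dedup.length ≤ v.length :=
      ((List.nodup_dedup F).subperm hsv).length_le
    obtain ⟨c, h1, h2, h3⟩ := sublist_pad F F.dedup v.length hsF hslen hcnt
    refine ⟨c, (mem_pyCombinations tup v.length c).2 ⟨h2.trans hFt, h3⟩, ?_⟩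
    rw [PySem.Set.equal_iff]
    intro x
    simp only [PySem.Set.mem_ofList]
    constructor
    · intro hx
      have : x ∈ F := h2.subset hx
      have := List.of_mem_filter this
      simpa [hp, PySem.Set.mem_ofList] using this
    · intro hx
      apply h1.subset
      rw [List.mem_dedup]
      exact List.mem_filter.2 ⟨hsub x hx, by simp [hp, PySem.Set.mem_ofList, hx]⟩

-- the conditional grouping loop of B is the plain modify-append loop over the filtered pairs
lemma foldl_modify_if (C : String × List String → Prop) [DecidablePred C]
    (l : List (String × List String)) (b : PySem.Dict Int (List String)) :
    l.foldl (fun b kv => if C kv then b.modify ((kv.2.length : Int)) [] (· ++ [kv.1]) else b) b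
    = ((l.filter (fun kv => decide (C kv))).map (fun kv => ((kv.2.length : Int), kv.1))).foldl
        (fun b p => b.modify p.1 [] (· ++ [p.2])) b := by
  induction l generalizing b with
  | nil => rfl
  | cons kv l ih =>
    by_cases h : C kv <;> simp [h, ih]

lemma main_eq (f : String) (tup : List String) (d : List (String × List String)) :
    get_tau_facets_py f tup d = get_tau_facets_py_alt f tup d := by
  simp only [get_tau_facets_py, get_tau_facets_py_alt]
  by_cases hL : tup.length > 1
  case neg =>
    rw [if_neg hL, PySem.List.pyRange_neg_one_eq_nil (by omega)]
    rfl
  case pos =>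
    rw [if_pos hL]
    simp only [PySem.List.foldl_append_if, foldl_modify_if, PySem.Dict.getD_foldl_modify_append]
    apply PySem.List.foldl_congr_mem
    intro acc i hi
    rw [PySem.List.mem_pyRange_neg_one] at hi
    congr 1
    rw [List.filter_map, List.map_map, List.filter_filter, PySem.Dict.getD_empty, List.nil_append]
    refine Eq.trans (congrArg _ (List.filter_congr ?_)) rfl
    intro kv _
    simp only [Function.comp_apply]
    by_cases hlen : (kv.2.length : Int) = i
    · have hnat : i.toNat = kv.2.length := by omega
      have h2 : 1 ≤ kv.2.length := by omega
      have h3 : kv.2.length < tup.length := by omega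
      rw [List.any_map, hnat, hlen]
      congr 1
      rw [Bool.eq_iff_iff, decide_eq_true_iff]
      have hcomb := combos_iff tup kv.2
      simp only [PySem.Set.issubset_iff, PySem.Set.mem_ofList] at hcomb ⊢
      constructor
      · intro h
        obtain ⟨hs, hc⟩ := hcomb.1 h
        exact ⟨h2, h3, hs, hc⟩
      · rintro ⟨_, _, hs, hc⟩
        exact hcomb.2 ⟨hs, hc⟩
    · have hfalse : ((kv.2.length : Int) == i) = false := by simpa using hlen
      rw [hfalse, Bool.false_and, Bool.false_and]

-- ===== VERDICT (by name: the statement is the Claim_ definition above) =====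
theorem get_tau_facets_py_spec : Claim_equal_get_tau_facets_py := by
  intro f tup d _
  unfold Spec_get_tau_facets_py
  exact main_eq f tup d
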